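-- pv_equiv track=rewrite | github.com/worms618/AoC2021 | src/day3/day3.py | getEpsilonRate
-- ===== SOURCE A (Python) =====
-- def countCharactersAtIndex(values, index):
--     counter = {}
--
--     for chars in map(lambda x: list(x), values):
--         charAtIndex = chars[index]
--         if not charAtIndex in counter:
--             counter.setdefault(charAtIndex, 0)
--
--         counter[charAtIndex] = counter[charAtIndex] + 1
--
--     return counter
--
-- def countCharactersPerIndex(values):
--     counter = []
--     totalCharsPerValue = len(values[0])
--
--     for index in range(totalCharsPerValue):
--         counter.append(countCharactersAtIndex(values, index))
--
--     return counter
--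
-- def getEpsilonRate(values):
--     charsPerIndex = countCharactersPerIndex(values)
--     epsilonRate = ""
--
--     for charsAtIndex in charsPerIndex:
--         nextValue = ""
--         nextValueOccures = -1
--         for char in charsAtIndex:
--             if (nextValueOccures < 0) | (charsAtIndex[char] < nextValueOccures):
--                 nextValue = char
--                 nextValueOccures = charsAtIndex[char]
--         epsilonRate = epsilonRate + nextValue
--
--     return epsilonRate
-- ===== SOURCE B (Python) =====
-- def getEpsilonRate(values):
--     # one pass over values, updating every per-column counter simultaneously
--     counters = [{} for _ in range(len(values[0]))]
--     for v in values:
--         for d, c in zip(counters, v):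
--             d[c] = d.get(c, 0) + 1
--     return "".join(min(d, key=d.get) for d in counters)
-- ===== Notes on version B (the rewrite author's own statement) =====
-- stated objective: faster
-- what changed: A rescans the whole input once per column (a fresh dict per index); B makes a single pass over the values updating all per-column counters simultaneously, then joins the least-frequent key of each counter.
import Mathlib
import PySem

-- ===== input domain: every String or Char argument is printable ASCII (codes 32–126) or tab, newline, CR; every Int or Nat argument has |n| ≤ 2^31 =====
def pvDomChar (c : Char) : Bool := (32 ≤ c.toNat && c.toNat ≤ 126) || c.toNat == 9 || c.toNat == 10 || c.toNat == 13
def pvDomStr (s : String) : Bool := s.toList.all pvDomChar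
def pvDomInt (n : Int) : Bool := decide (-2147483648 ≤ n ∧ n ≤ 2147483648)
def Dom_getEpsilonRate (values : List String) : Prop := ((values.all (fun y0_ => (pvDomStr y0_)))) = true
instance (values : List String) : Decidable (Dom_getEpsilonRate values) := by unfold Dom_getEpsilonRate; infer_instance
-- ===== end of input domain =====

-- B replaces A's per-column re-scan of all values (O(N·L) dict passes, one per column) by a single
-- pass over the values that updates all L per-column counters simultaneously; objective: faster.
-- Strings are built as List Char and converted with String.ofList at the end (exact; Lean's String.append is kernel-opaque).

-- ===== PORT A =====
-- body of A's per-value update: `if not c in counter: counter.setdefault(c, 0); counter[c] = counter[c] + 1`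
-- (the final `counter[c]` lookup cannot fail: c was just ensured present, so getD is exact)
def pvStepCount (counter : PySem.Dict Char Int) (c : Char) : PySem.Dict Char Int :=
  let counter := if counter.contains c then counter else counter.setdefault c 0
  counter.insert c (counter.getD c 0 + 1)

def countCharactersAtIndex (values : List String) (index : Int) : PySem.Dict Char Int :=
  values.foldl (fun counter s =>
    match PySem.List.pyGet? s.toList index with
    | some charAtIndex => pvStepCount counter charAtIndex
    | none => counter   -- Python raises IndexError here; excluded by Pre_
  ) PySem.Dict.empty

def countCharactersPerIndex (values : List String) : List (PySem.Dict Char Int) :=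
  -- len(values[0]) raises IndexError on an empty list; excluded by Pre_
  let totalCharsPerValue : Int := PySem.Str.len ((PySem.List.pyGet? values 0).getD "")
  (PySem.List.pyRange 0 totalCharsPerValue 1).map (fun index => countCharactersAtIndex values index)

def getEpsilonRate (values : List String) : String :=
  let charsPerIndex := countCharactersPerIndex values
  String.ofList (charsPerIndex.foldl (fun epsilonRate charsAtIndex =>
    -- `for char in charsAtIndex` iterates the dict's keys; `charsAtIndex[char]` is getD (key present)
    let pick := charsAtIndex.keys.foldl (fun st char =>
      if (decide (st.2 < 0) || decide (charsAtIndex.getD char 0 < st.2))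
      then ([char], charsAtIndex.getD char 0) else st)
      (([] : List Char), (-1 : Int))
    epsilonRate ++ pick.1) [])

-- ===== PORT B =====
def pvBump (d : PySem.Dict Char Int) (c : Char) : PySem.Dict Char Int :=
  d.insert c (d.getD c 0 + 1)

def getEpsilonRate_alt (values : List String) : String :=
  -- len(values[0]) raises IndexError on an empty list; excluded by Pre_
  let counters := values.foldl (fun cs v => List.zipWith pvBump cs v.toList ++ cs.drop v.toList.length)
      (List.replicate ((PySem.List.pyGet? values 0).getD "").toList.length PySem.Dict.empty)
  -- min(d, key=d.get): every key is present, so d.get = getD; min over the (nonempty under Pre_) keys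
  String.ofList (counters.map (fun d => PySem.List.minD d.keys (fun c => d.getD c 0) ' '))

-- ===== PRECONDITION & SPEC =====
-- Pre_ excludes exactly the inputs where A raises IndexError: the empty list (values[0]) and
-- lists where some value is shorter than values[0] (chars[index] out of range).
def Pre_getEpsilonRate (values : List String) : Prop :=
  values ≠ [] ∧ ∀ v ∈ values, (values.headD "").toList.length ≤ v.toList.length
instance (values : List String) : Decidable (Pre_getEpsilonRate values) := by
  unfold Pre_getEpsilonRate; infer_instance

def pvWitness_getEpsilonRate : List String := ["01", "10", "11"]

def Spec_getEpsilonRate (values : List String) (out : String) : Prop := out = getEpsilonRate_alt values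
instance (values : List String) (out : String) : Decidable (Spec_getEpsilonRate values out) := by
  unfold Spec_getEpsilonRate; infer_instance

-- ===== CLAIM (what is proved, stated in full; the proofs are below) =====
def Claim_equal_getEpsilonRate : Prop := ∀ (values : List String), Dom_getEpsilonRate values → Pre_getEpsilonRate values → Spec_getEpsilonRate values (getEpsilonRate values)
-- ===== LEMMAS AND PROOFS =====

-- A's per-value dict update is exactly B's bump
lemma pvStepCount_eq_pvBump (d : PySem.Dict Char Int) (c : Char) :
    pvStepCount d c = pvBump d c := by
  by_cases h : d.contains c = true
  · simp [pvStepCount, pvBump, h]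
  · have h' : d.contains c = false := by simpa using h
    simp [pvStepCount, pvBump, h', pysem]

-- column k of the input, as read by both programs (default irrelevant under the length hypothesis)
def pvCol (values : List String) (k : Nat) : List Char :=
  values.map (fun s => s.toList.getD k ' ')

-- A's per-index count is the Counter of column k
lemma countAtIndex_eq_counter (values : List String) (k : Nat)
    (h : ∀ v ∈ values, k < v.toList.length) :
    countCharactersAtIndex values (k : Int) = PySem.Dict.counter (pvCol values k) := by
  unfold countCharactersAtIndex pvCol
  rw [← PySem.Dict.foldl_insert_getD_add_one_eq_counter, List.foldl_map]
  have aux : ∀ (vs : List String) (d : PySem.Dict Char Int),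
      (∀ v ∈ vs, k < v.toList.length) →
      vs.foldl (fun counter s =>
        match PySem.List.pyGet? s.toList (k : Int) with
        | some charAtIndex => pvStepCount counter charAtIndex
        | none => counter) d
      = vs.foldl (fun d s => (fun d x => d.insert x (d.getD x 0 + 1)) d (s.toList.getD k ' ')) d := by
    intro vs
    induction vs with
    | nil => intro d _; rfl
    | cons s t ih =>
      intro d hall
      have hk : k < s.toList.length := hall s (List.mem_cons_self)
      have hget : PySem.List.pyGet? s.toList (k : Int) = some (s.toList.getD k ' ') := by
        rw [PySem.List.pyGet?_natCast, List.getElem?_eq_getElem hk,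
          List.getD_eq_getElem s.toList ' ' hk]
      simp only [List.foldl_cons, hget]
      rw [show pvStepCount d (s.toList.getD k ' ') = pvBump d (s.toList.getD k ' ') from
        pvStepCount_eq_pvBump _ _]
      exact ih _ (fun v hv => hall v (List.mem_cons_of_mem _ hv))
  exact aux values PySem.Dict.empty h

-- a list is the map of its getD over its index range
lemma map_getD_range {α : Type} (l : List α) (d : α) :
    (List.range l.length).map (fun i => l.getD i d) = l := by
  apply List.ext_getElem
  · simp
  · intro i h1 h2
    simp [List.getElem?_eq_getElem h2]

-- B's simultaneous fold computes, per column, the fold of that column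
lemma zip_fold (values : List String) :
    ∀ (cs : List (PySem.Dict Char Int)), (∀ v ∈ values, cs.length ≤ v.toList.length) →
    values.foldl (fun cs v => List.zipWith pvBump cs v.toList ++ cs.drop v.toList.length) cs
      = (List.range cs.length).map
          (fun i => (values.map (fun s => s.toList.getD i ' ')).foldl pvBump
                      (cs.getD i PySem.Dict.empty)) := by
  induction values with
  | nil => intro cs _; exact (map_getD_range cs PySem.Dict.empty).symm
  | cons v vs ih =>
    intro cs hall
    have hlen : cs.length ≤ v.toList.length := hall v (List.mem_cons_self)
    have hdrop : cs.drop v.toList.length = [] := List.drop_eq_nil_of_le hlen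
    have hzlen : (List.zipWith pvBump cs v.toList).length = cs.length := by
      simp only [List.length_zipWith]; omega
    simp only [List.foldl_cons, hdrop, List.append_nil]
    rw [ih _ (by intro u hu; rw [hzlen]; exact hall u (List.mem_cons_of_mem _ hu)), hzlen]
    refine List.map_congr_left ?_
    intro i hi
    have hi' : i < cs.length := List.mem_range.mp hi
    have hgz : (List.zipWith pvBump cs v.toList).getD i PySem.Dict.empty
        = pvBump (cs.getD i PySem.Dict.empty) (v.toList.getD i ' ') := by
      rw [List.getD_eq_getElem _ _ (by omega : i < (List.zipWith pvBump cs v.toList).length),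
        List.getElem_zipWith, List.getD_eq_getElem cs _ hi',
        List.getD_eq_getElem v.toList _ (by omega)]
    rw [hgz]
    simp [List.foldl_cons]

-- min(ks, key) of a nonempty list is the plain running minimum from its head
lemma min?_cons (key : Char → Int) :
    ∀ (ks : List Char) (m : Char),
    PySem.List.min? (m :: ks) key
      = some (ks.foldl (fun b c => if key c < key b then c else b) m) := by
  intro ks
  induction ks with
  | nil => intro m; rfl
  | cons c t ih =>
    intro m
    have h1 : PySem.List.min? (m :: c :: t) key
        = PySem.List.min? ((if key c < key m then c else m) :: t) key := by
      by_cases h : key c < key m <;> simp [PySem.List.min?, h]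
    rw [h1, ih]
    simp only [List.foldl_cons]

-- A's pick loop from a live state is the plain running minimum (counts stay nonnegative)
lemma pickAux (key : Char → Int) :
    ∀ (ks : List Char) (m : Char), (∀ c ∈ ks, 0 ≤ key c) → 0 ≤ key m →
    ks.foldl (fun st c => if (decide (st.2 < 0) || decide (key c < st.2))
        then ([c], key c) else st) ([m], key m)
      = ([ks.foldl (fun b c => if key c < key b then c else b) m],
         key (ks.foldl (fun b c => if key c < key b then c else b) m)) := by
  intro ks
  induction ks with
  | nil => intro m _ _; rfl
  | cons c t ih =>
    intro m hall hm
    have hc : 0 ≤ key c := hall c (List.mem_cons_self)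
    have hall' : ∀ x ∈ t, 0 ≤ key x := fun x hx => hall x (List.mem_cons_of_mem _ hx)
    simp only [List.foldl_cons]
    have hne : ¬ (key m < 0) := by omega
    by_cases h : key c < key m
    · rw [if_pos (by simp [hne, h]), if_pos h]
      exact ih c hall' hc
    · rw [if_neg (by simp [hne, h]), if_neg h]
      exact ih m hall' hm

-- A's pick over a nonempty dict with nonnegative counts is B's min
lemma pick_eq (d : PySem.Dict Char Int) (hne : d.keys ≠ [])
    (hpos : ∀ c ∈ d.keys, 0 ≤ d.getD c 0) :
    (d.keys.foldl (fun st char =>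
        if (decide (st.2 < 0) || decide (d.getD char 0 < st.2))
        then ([char], d.getD char 0) else st) (([] : List Char), (-1 : Int))).1
      = [PySem.List.minD d.keys (fun c => d.getD c 0) ' '] := by
  cases hk : d.keys with
  | nil => exact absurd hk hne
  | cons m t =>
    have hm : 0 ≤ d.getD m 0 := hpos m (by rw [hk]; exact List.mem_cons_self)
    have hall : ∀ c ∈ t, 0 ≤ d.getD c 0 := fun c hc =>
      hpos c (by rw [hk]; exact List.mem_cons_of_mem _ hc)
    simp only [List.foldl_cons, show (decide ((-1 : Int) < 0)) = true from rfl,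
      Bool.true_or, if_true]
    rw [pickAux (fun c => d.getD c 0) t m hall hm]
    simp only [PySem.List.minD, min?_cons (fun c => d.getD c 0) t m, Option.getD_some]

-- a flatMap of pointwise singletons is a map
lemma flatMap_singleton_of {α β : Type} (l : List α) (f : α → List β) (g : α → β)
    (h : ∀ x ∈ l, f x = [g x]) : l.flatMap f = l.map g := by
  induction l with
  | nil => rfl
  | cons x t ih =>
    simp only [List.flatMap_cons, List.map_cons, h x (List.mem_cons_self),
      ih (fun y hy => h y (List.mem_cons_of_mem _ hy)), List.singleton_append]

-- ===== VERDICT (by name: the statement is the Claim_ definition above) =====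
theorem getEpsilonRate_spec : Claim_equal_getEpsilonRate := by
  intro values _ hpre
  unfold Spec_getEpsilonRate
  obtain ⟨hne, hlen⟩ := hpre
  cases values with
  | nil => exact absurd rfl hne
  | cons h0 t =>
    have hlen' : ∀ v ∈ h0 :: t, h0.toList.length ≤ v.toList.length := by
      simpa using hlen
    have hget0 : PySem.List.pyGet? (h0 :: t) (0 : Int) = some h0 := by
      simp [PySem.List.pyGet?, PySem.List.pyIdx?]
    -- the per-column dicts both programs compute
    have hdictB :
        (h0 :: t).foldl (fun cs v => List.zipWith pvBump cs v.toList ++ cs.drop v.toList.length)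
          (List.replicate h0.toList.length PySem.Dict.empty)
        = (List.range h0.toList.length).map
            (fun i => PySem.Dict.counter (pvCol (h0 :: t) i)) := by
      rw [zip_fold (h0 :: t) _ (by
        intro v hv
        rw [List.length_replicate]
        exact hlen' v hv)]
      rw [List.length_replicate]
      refine List.map_congr_left ?_
      intro i hi
      rw [List.getD_eq_getElem _ _ (by simpa using hi), List.getElem_replicate]
      rw [show pvCol (h0 :: t) i
          = (h0 :: t).map (fun s => s.toList.getD i ' ') from rfl]
      rw [← PySem.Dict.foldl_insert_getD_add_one_eq_counter]
      rfl
    -- per-column nonemptiness and nonnegativity of counts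
    have hkeysne : ∀ i : Nat, (PySem.Dict.counter (pvCol (h0 :: t) i)).keys ≠ [] := by
      intro i
      rw [PySem.Dict.keys_counter]
      have : h0.toList.getD i ' ' ∈ PySem.Set.ofList (pvCol (h0 :: t) i) := by
        rw [PySem.Set.mem_ofList]
        exact List.mem_map_of_mem (List.mem_cons_self)
      exact List.ne_nil_of_mem this
    have hpos : ∀ i : Nat, ∀ c ∈ (PySem.Dict.counter (pvCol (h0 :: t) i)).keys,
        0 ≤ (PySem.Dict.counter (pvCol (h0 :: t) i)).getD c 0 := by
      intro i c _
      rw [PySem.Dict.getD_counter]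
      exact_mod_cast Int.natCast_nonneg _
    -- A's list of per-column dicts
    have hdictA : countCharactersPerIndex (h0 :: t)
        = (List.range h0.toList.length).map
            (fun i => PySem.Dict.counter (pvCol (h0 :: t) i)) := by
      unfold countCharactersPerIndex
      rw [hget0]
      simp only [Option.getD_some, PySem.Str.len_eq, PySem.List.pyRange_one]
      rw [show (((h0.toList.length : Int)) - 0).toNat = h0.toList.length by omega]
      rw [List.map_map]
      refine List.map_congr_left ?_
      intro i hi
      have hi' : i < h0.toList.length := List.mem_range.mp hi
      show countCharactersAtIndex (h0 :: t) ((0 : Int) + (i : Int)) = _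
      rw [zero_add]
      exact countAtIndex_eq_counter (h0 :: t) i
        (fun v hv => lt_of_lt_of_le hi' (hlen' v hv))
    -- assemble
    unfold getEpsilonRate getEpsilonRate_alt
    rw [hdictA, hget0]
    simp only [Option.getD_some]
    rw [hdictB]
    congr 1
    rw [PySem.List.foldl_append_eq_flatMap, List.nil_append, List.map_map]
    rw [flatMap_singleton_of _ _
      (fun d => PySem.List.minD d.keys (fun c => d.getD c 0) ' ') ?_]
    · rw [List.map_map]
    · intro d hd
      obtain ⟨i, hi, rfl⟩ := List.mem_map.mp hd
      exact pick_eq _ (hkeysne i) (hpos i)
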